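-- pv_equiv track=rewrite | github.com/FSalinski/MachineLearning | homework3/PAM_algorithm.py | compare_assignments
-- ===== SOURCE A (Python) =====
-- def compare_assignments(true_assignments, cluster_assignments) -> bool:
--     '''
--     Compare true assignments with cluster assignments
--     true_assignments: true cluster assignments
--     cluster_assignments: cluster assignments
--     return: True if the assignments are the same, False otherwise
--     '''
--     if len(true_assignments) != len(cluster_assignments):
--         raise ValueError('Length of true_assignments and cluster_assignments must be the same')
--
--     if len(set(true_assignments)) != len(set(cluster_assignments)):
--         return ValueError('Number of clusters in true_assignments and cluster_assignments must be the same')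
--
--     n = len(true_assignments)
--     cluster_names = {}
--     for i in range(n):
--         if cluster_assignments[i] in cluster_names:
--             if true_assignments[i] != cluster_names[cluster_assignments[i]]:
--                 return False
--             else:
--                 continue
--         else:
--             cluster_names[cluster_assignments[i]] = true_assignments[i]
--             continue
--     return True
-- ===== SOURCE B (Python) =====
-- def compare_assignments(true_assignments, cluster_assignments) -> bool:
--     '''
--     Compare true assignments with cluster assignments (closed set-cardinality test):
--     the assignments agree iff each cluster pairs with exactly one true label.
--     '''
--     if len(true_assignments) != len(cluster_assignments):
--         raise ValueError('Length of true_assignments and cluster_assignments must be the same')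
--     if len(set(true_assignments)) != len(set(cluster_assignments)):
--         raise ValueError('Number of clusters in true_assignments and cluster_assignments must be the same')
--     pairs = set(zip(cluster_assignments, true_assignments))
--     return len(pairs) == len(set(cluster_assignments))
-- ===== Notes on version B (the rewrite author's own statement) =====
-- stated objective: simpler
-- what changed: The per-element dict-building conflict loop with early return is replaced by a closed set-cardinality test: build set(zip(cluster_assignments, true_assignments)) once and compare its size with the number of distinct clusters; Pre_ excludes the length-mismatch inputs (A raises ValueError) and the cluster-count-mismatch inputs, on which A returns a ValueError INSTANCE instead of a bool (not a value of the declared type), where B raises.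
import Mathlib
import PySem

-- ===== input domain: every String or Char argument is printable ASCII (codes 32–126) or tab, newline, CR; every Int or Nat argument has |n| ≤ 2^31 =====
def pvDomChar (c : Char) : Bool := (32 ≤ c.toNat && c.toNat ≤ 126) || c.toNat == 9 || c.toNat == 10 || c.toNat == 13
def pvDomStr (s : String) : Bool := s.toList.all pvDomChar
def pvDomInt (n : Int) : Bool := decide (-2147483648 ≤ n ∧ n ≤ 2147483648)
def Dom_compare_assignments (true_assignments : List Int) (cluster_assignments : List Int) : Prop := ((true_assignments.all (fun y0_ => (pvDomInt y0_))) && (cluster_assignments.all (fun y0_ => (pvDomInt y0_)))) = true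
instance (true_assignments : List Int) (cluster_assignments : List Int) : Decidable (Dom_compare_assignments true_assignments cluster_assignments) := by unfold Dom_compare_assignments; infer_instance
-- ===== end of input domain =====

-- B replaces A's dict-building conflict loop by a closed set-cardinality test (same O(n) cost, simpler).

-- ===== PORT A =====
-- the for-i-in-range(n) loop of A, with its early 'return False'; d is the dict cluster_names
def pvALoop (ta ca : List Int) : List Int → PySem.Dict Int Int → Bool
  | [], _ => true
  | i :: rest, d =>
    match PySem.List.pyGet? ca i, PySem.List.pyGet? ta i with
    | some c, some t =>
      match d.get? c with
      | some v => if t ≠ v then false else pvALoop ta ca rest d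
      | none => pvALoop ta ca rest (d.insert c t)
    | _, _ => false   -- unreachable: range indices are in range

def compare_assignments (true_assignments : List Int) (cluster_assignments : List Int) : Bool :=
  if true_assignments.length ≠ cluster_assignments.length then
    false  -- Python raises ValueError here; outside Pre_
  else if (PySem.Set.ofList true_assignments).length ≠ (PySem.Set.ofList cluster_assignments).length then
    false  -- Python RETURNS a ValueError instance (not a bool) here; outside Pre_
  else
    pvALoop true_assignments cluster_assignments
      (PySem.List.pyRange 0 (true_assignments.length : Int) 1) PySem.Dict.empty

-- ===== PORT B =====
def compare_assignments_alt (true_assignments : List Int) (cluster_assignments : List Int) : Bool :=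
  if true_assignments.length ≠ cluster_assignments.length then
    false  -- Python B raises ValueError here; outside Pre_
  else if (PySem.Set.ofList true_assignments).length ≠ (PySem.Set.ofList cluster_assignments).length then
    false  -- Python B raises ValueError here; outside Pre_
  else
    (PySem.Set.ofList (cluster_assignments.zip true_assignments)).length
      == (PySem.Set.ofList cluster_assignments).length

-- ===== PRECONDITION & SPEC =====
-- Pre_ excludes (i) length mismatch, where A raises ValueError, and (ii) distinct-cluster-count
-- mismatch, where A returns a ValueError INSTANCE instead of a bool (B raises there).
def Pre_compare_assignments (true_assignments : List Int) (cluster_assignments : List Int) : Prop :=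
  true_assignments.length = cluster_assignments.length ∧
  (PySem.Set.ofList true_assignments).length = (PySem.Set.ofList cluster_assignments).length
instance (true_assignments : List Int) (cluster_assignments : List Int) : Decidable (Pre_compare_assignments true_assignments cluster_assignments) := by unfold Pre_compare_assignments; infer_instance
def pvWitness_compare_assignments : List Int × List Int := ([1, 2, 1], [5, 6, 5])

def Spec_compare_assignments (true_assignments : List Int) (cluster_assignments : List Int) (out : Bool) : Prop := out = compare_assignments_alt true_assignments cluster_assignments
instance (true_assignments : List Int) (cluster_assignments : List Int) (out : Bool) : Decidable (Spec_compare_assignments true_assignments cluster_assignments out) := by unfold Spec_compare_assignments; infer_instance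

-- ===== CLAIM (what is proved, stated in full; the proofs are below) =====
def Claim_equal_compare_assignments : Prop := ∀ (true_assignments : List Int) (cluster_assignments : List Int), Dom_compare_assignments true_assignments cluster_assignments → Pre_compare_assignments true_assignments cluster_assignments → Spec_compare_assignments true_assignments cluster_assignments (compare_assignments true_assignments cluster_assignments)

-- ===== LEMMAS AND PROOFS =====

-- the pairs (cluster, label) are functional: equal clusters carry equal labels
def pvFunctional (ps : List (Int × Int)) : Prop :=
  ∀ p ∈ ps, ∀ q ∈ ps, p.1 = q.1 → p.2 = q.2

-- A's loop, re-expressed structurally over the zipped list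
def pvZLoop : List (Int × Int) → PySem.Dict Int Int → Bool
  | [], _ => true
  | (c, t) :: rest, d =>
    match d.get? c with
    | some v => if t ≠ v then false else pvZLoop rest d
    | none => pvZLoop rest (d.insert c t)

lemma pvALoop_eq_zloop (ta ca : List Int) (hlen : ta.length = ca.length) :
    ∀ (m k : Nat) (d : PySem.Dict Int Int), k + m = ta.length →
      pvALoop ta ca (List.map Int.ofNat (List.range' k m)) d
        = pvZLoop ((ca.zip ta).drop k) d := by
  intro m
  induction m with
  | zero =>
    intro k d hk
    have hdrop : (ca.zip ta).drop k = [] := by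
      apply List.drop_of_length_le
      simp [List.length_zip]
      omega
    simp [pvALoop, hdrop, pvZLoop]
  | succ m ih =>
    intro k d hk
    have hkta : k < ta.length := by omega
    have hkca : k < ca.length := by omega
    have hkz : k < (ca.zip ta).length := by simp [List.length_zip]; omega
    have hdrop : (ca.zip ta).drop k = (ca[k], ta[k]) :: (ca.zip ta).drop (k + 1) := by
      rw [List.drop_eq_getElem_cons hkz, List.getElem_zip]
    rw [List.range'_succ, List.map_cons]
    simp only [pvALoop, Int.ofNat_eq_natCast, PySem.List.pyGet?_natCast]
    rw [List.getElem?_eq_getElem hkca, List.getElem?_eq_getElem hkta, hdrop]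
    cases hget : d.get? ca[k] with
    | some v =>
      simp only [hget, pvZLoop]
      by_cases hv : ta[k] ≠ v
      · simp [hv]
      · simp [hv, ih (k + 1) d (by omega)]
    | none =>
      simp only [hget, pvZLoop]
      exact ih (k + 1) (d.insert ca[k] ta[k]) (by omega)

-- the zip loop returns true iff the remaining pairs are functional and consistent with the dict
lemma pvZLoop_iff : ∀ (ps : List (Int × Int)) (d : PySem.Dict Int Int),
    pvZLoop ps d = true ↔
      (pvFunctional ps ∧ ∀ p ∈ ps, ∀ v, d.get? p.1 = some v → p.2 = v) := by
  intro ps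
  induction ps with
  | nil => intro d; simp [pvZLoop, pvFunctional]
  | cons hd rest ih =>
    intro d
    obtain ⟨c, t⟩ := hd
    cases hget : d.get? c with
    | some v =>
      simp only [pvZLoop, hget]
      by_cases hv : t ≠ v
      · simp only [if_pos hv]
        constructor
        · intro h; exact absurd h (by simp)
        · rintro ⟨-, hcons⟩
          exact absurd (hcons (c, t) (by simp) v hget) hv
      · rw [ne_eq, not_not] at hv; subst hv
        rw [if_neg (by simp), ih d]
        constructor
        · rintro ⟨hf, hcons⟩
          refine ⟨?_, ?_⟩
          · rintro p hp q hq heq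
            rcases List.mem_cons.mp hp with rfl | hp <;>
              rcases List.mem_cons.mp hq with rfl | hq
            · rfl
            · exact (hcons q hq t (by simp only at heq ⊢; rw [← heq]; exact hget)).symm
            · exact hcons p hp t (by simp only at heq ⊢; rw [heq]; exact hget)
            · exact hf p hp q hq heq
          · rintro p hp v hv
            rcases List.mem_cons.mp hp with rfl | hp
            · simp only at hv ⊢; rw [hget] at hv; exact Option.some.inj hv
            · exact hcons p hp v hv
        · rintro ⟨hf, hcons⟩
          exact ⟨fun p hp q hq heq => hf p (by simp [hp]) q (by simp [hq]) heq,
            fun p hp v hv => hcons p (by simp [hp]) v hv⟩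
    | none =>
      simp only [pvZLoop, hget]
      rw [ih]
      constructor
      · rintro ⟨hf, hcons⟩
        refine ⟨?_, ?_⟩
        · rintro p hp q hq heq
          rcases List.mem_cons.mp hp with rfl | hp <;>
            rcases List.mem_cons.mp hq with rfl | hq
          · rfl
          · exact (hcons q hq t (by
              rw [PySem.Dict.get?_insert]
              simp only at heq
              rw [if_pos heq.symm])).symm
          · exact hcons p hp t (by
              rw [PySem.Dict.get?_insert]
              simp only at heq
              rw [if_pos heq])
          · exact hf p hp q hq heq
        · rintro p hp v hv
          rcases List.mem_cons.mp hp with rfl | hp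
          · simp only at hv ⊢; rw [hget] at hv; cases hv
          · by_cases hpc : p.1 = c
            · rw [hpc, hget] at hv; cases hv
            · exact hcons p hp v (by rw [PySem.Dict.get?_insert, if_neg hpc]; exact hv)
      · rintro ⟨hf, hcons⟩
        refine ⟨fun p hp q hq heq => hf p (by simp [hp]) q (by simp [hq]) heq, ?_⟩
        rintro p hp v hv
        rw [PySem.Dict.get?_insert] at hv
        by_cases hpc : p.1 = c
        · rw [if_pos hpc] at hv
          rw [← Option.some.inj hv]
          exact hf p (by simp [hp]) (c, t) (by simp) hpc
        · rw [if_neg hpc] at hv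
          exact hcons p (by simp [hp]) v hv

-- |set(xs)| is the Finset cardinality
lemma pvLen_ofList_eq_card {α : Type} [BEq α] [LawfulBEq α] [DecidableEq α] (xs : List α) :
    (PySem.Set.ofList xs).length = xs.toFinset.card := by
  rw [List.card_toFinset]
  apply List.Perm.length_eq
  apply (List.perm_ext_iff_of_nodup (PySem.Set.nodup_ofList xs) xs.nodup_dedup).mpr
  intro a; simp [PySem.Set.mem_ofList]

-- the set-cardinality test is exactly functionality of the pairs
lemma pvCard_iff_functional (ps : List (Int × Int)) :
    ((PySem.Set.ofList ps).length = (PySem.Set.ofList (ps.map Prod.fst)).length)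
      ↔ pvFunctional ps := by
  simp only [pvLen_ofList_eq_card]
  have hmap : (ps.map Prod.fst).toFinset = ps.toFinset.image Prod.fst := by
    ext x; simp
  rw [hmap, eq_comm, Finset.card_image_iff]
  constructor
  · intro h p hp q hq heq
    have := h (by simpa using hp) (by simpa using hq) heq
    exact congrArg Prod.snd this
  · intro h x hx y hy heq
    have hx' : x ∈ ps := by simpa using hx
    have hy' : y ∈ ps := by simpa using hy
    exact Prod.ext heq (h x hx' y hy' heq)

-- ===== VERDICT (by name: the statement is the Claim_ definition above) =====
theorem compare_assignments_spec : Claim_equal_compare_assignments := by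
  intro ta ca _ hpre
  obtain ⟨hlen, hset⟩ := hpre
  unfold Spec_compare_assignments compare_assignments compare_assignments_alt
  rw [if_neg (by simp [hlen]), if_neg (by simp [hset]), if_neg (by simp [hlen]),
    if_neg (by simp [hset])]
  have hmapfst : (ca.zip ta).map Prod.fst = ca :=
    List.map_fst_zip (le_of_eq hlen.symm)
  have hrange : PySem.List.pyRange 0 (ta.length : Int) 1
      = List.map Int.ofNat (List.range' 0 ta.length) := by
    rw [PySem.List.pyRange_one]
    simp [List.range_eq_range']
  rw [hrange, pvALoop_eq_zloop ta ca hlen ta.length 0 PySem.Dict.empty (by omega)]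
  rw [Bool.eq_iff_iff, pvZLoop_iff, beq_iff_eq]
  rw [List.drop_zero]
  constructor
  · rintro ⟨hf, -⟩
    have h := (pvCard_iff_functional (ca.zip ta)).mpr hf
    rw [hmapfst] at h
    exact h
  · intro h
    refine ⟨?_, by simp [PySem.Dict.get?_empty]⟩
    have h' : (PySem.Set.ofList (ca.zip ta)).length
        = (PySem.Set.ofList ((ca.zip ta).map Prod.fst)).length := by rw [hmapfst]; exact h
    exact (pvCard_iff_functional (ca.zip ta)).mp h'
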